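-- pv_equiv track=rewrite | github.com/yannickloth/W33-Theory | archive/dirs/TOE_Wilmot_G2_Clifford_breakthrough_v01_20260227_bundle/src/pockets_540.py | pocket_activity
-- ===== SOURCE A (Python) =====
-- from itertools import combinations
--
-- def pocket_activity(pocket, pair_to_third):
--     pocket=set(pocket)
--     active=set()
--     for a,b in combinations(pocket,2):
--         k=pair_to_third.get((min(a,b),max(a,b)))
--         if k is not None and k in pocket:
--             active.add(a); active.add(b); active.add(k)
--     return active
-- ===== SOURCE B (Python) =====
-- def pocket_activity(pocket, pair_to_third):
--     # Scan the relation once instead of enumerating all pocket pairs.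
--     pocket = set(pocket)
--     active = set()
--     for (x, y), k in pair_to_third.items():
--         if x in pocket and y in pocket and x < y and k in pocket:
--             active.add(x); active.add(y); active.add(k)
--     return active
-- ===== Notes on version B (the rewrite author's own statement) =====
-- stated objective: faster
-- what changed: B iterates once over pair_to_third.items(), accepting an entry ((x,y),k) when x, y, k are all in the pocket and x<y, instead of enumerating every pair of the pocket set and looking each up in the dict.
import Mathlib
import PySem

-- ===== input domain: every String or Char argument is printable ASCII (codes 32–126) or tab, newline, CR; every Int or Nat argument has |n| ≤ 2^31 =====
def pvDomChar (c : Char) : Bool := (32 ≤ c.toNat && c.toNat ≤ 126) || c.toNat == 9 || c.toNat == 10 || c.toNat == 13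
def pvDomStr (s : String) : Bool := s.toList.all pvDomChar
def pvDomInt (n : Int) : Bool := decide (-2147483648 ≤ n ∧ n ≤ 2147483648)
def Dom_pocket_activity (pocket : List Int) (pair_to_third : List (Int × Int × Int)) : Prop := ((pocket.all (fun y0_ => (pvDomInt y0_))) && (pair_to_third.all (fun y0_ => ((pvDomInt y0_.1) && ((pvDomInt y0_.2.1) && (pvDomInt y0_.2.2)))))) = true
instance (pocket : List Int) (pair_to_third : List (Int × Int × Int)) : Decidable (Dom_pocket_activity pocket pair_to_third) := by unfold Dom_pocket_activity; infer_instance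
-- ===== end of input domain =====

-- B scans pair_to_third once (accepting entries ((x,y),k) with x,y,k in the pocket and x<y)
-- instead of enumerating all pocket pairs; Python returns an (unordered) set, so both ports
-- return the active set in ascending order as its canonical representative.


-- ===== PORT A =====
-- itertools.combinations(s, 2): all pairs (s[i], s[j]) with i < j
def pvCombos2 {α : Type} : List α → List (α × α)
  | [] => []
  | x :: xs => xs.map (fun y => (x, y)) ++ pvCombos2 xs

-- pair_to_third.get((x, y)): first entry of the association list whose key is (x, y)
def pvDictGet (d : List (Int × Int × Int)) (x y : Int) : Option Int :=
  (d.find? (fun t => t.1 == x && t.2.1 == y)).map (fun t => t.2.2)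

def pocket_activity (pocket : List Int) (pair_to_third : List (Int × Int × Int)) : List Int :=
  let pocketS : PySem.Set Int := PySem.Set.ofList pocket
  let active : PySem.Set Int :=
    (pvCombos2 pocketS).foldl (fun acc ab =>
      match pvDictGet pair_to_third (min ab.1 ab.2) (max ab.1 ab.2) with
      | some k =>
          if PySem.Set.contains pocketS k then
            PySem.Set.add (PySem.Set.add (PySem.Set.add acc ab.1) ab.2) k
          else acc
      | none => acc) PySem.Set.empty
  PySem.List.sorted active (fun x => x) false

-- ===== PORT B =====
def pocket_activity_alt (pocket : List Int) (pair_to_third : List (Int × Int × Int)) : List Int :=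
  let pocketS : PySem.Set Int := PySem.Set.ofList pocket
  let active : PySem.Set Int :=
    pair_to_third.foldl (fun acc t =>
      if PySem.Set.contains pocketS t.1 && PySem.Set.contains pocketS t.2.1
          && decide (t.1 < t.2.1) && PySem.Set.contains pocketS t.2.2 then
        PySem.Set.add (PySem.Set.add (PySem.Set.add acc t.1) t.2.1) t.2.2
      else acc) PySem.Set.empty
  PySem.List.sorted active (fun x => x) false

-- ===== PRECONDITION & SPEC =====
-- Pre_ only requires the association list to carry pairwise-distinct keys: it encodes a Python
-- dict, which cannot hold duplicate keys, so no actual Python input is excluded.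
def Pre_pocket_activity (pocket : List Int) (pair_to_third : List (Int × Int × Int)) : Prop :=
  (pair_to_third.map (fun t => (t.1, t.2.1))).Nodup
instance (pocket : List Int) (pair_to_third : List (Int × Int × Int)) : Decidable (Pre_pocket_activity pocket pair_to_third) := by unfold Pre_pocket_activity; infer_instance

def pvWitness_pocket_activity : List Int × (List (Int × Int × Int)) := ([1, 2, 3, 4], [(2, 3, 4), (1, 2, 3)])

def Spec_pocket_activity (pocket : List Int) (pair_to_third : List (Int × Int × Int)) (out : List Int) : Prop := out = pocket_activity_alt pocket pair_to_third
instance (pocket : List Int) (pair_to_third : List (Int × Int × Int)) (out : List Int) : Decidable (Spec_pocket_activity pocket pair_to_third out) := by unfold Spec_pocket_activity; infer_instance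

-- ===== CLAIM (what is proved, stated in full; the proofs are below) =====
def Claim_equal_pocket_activity : Prop := ∀ (pocket : List Int) (pair_to_third : List (Int × Int × Int)), Dom_pocket_activity pocket pair_to_third → Pre_pocket_activity pocket pair_to_third → Spec_pocket_activity pocket pair_to_third (pocket_activity pocket pair_to_third)

-- ===== LEMMAS AND PROOFS =====

-- membership in A's accumulating fold
theorem memA (d : List (Int × Int × Int)) (P : PySem.Set Int)
    (pairs : List (Int × Int)) (s : PySem.Set Int) (v : Int) :
    v ∈ pairs.foldl (fun acc ab =>
      match pvDictGet d (min ab.1 ab.2) (max ab.1 ab.2) with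
      | some k =>
          if PySem.Set.contains P k then
            PySem.Set.add (PySem.Set.add (PySem.Set.add acc ab.1) ab.2) k
          else acc
      | none => acc) s
    ↔ v ∈ s ∨ ∃ ab ∈ pairs, ∃ k, pvDictGet d (min ab.1 ab.2) (max ab.1 ab.2) = some k ∧
        k ∈ P ∧ (v = ab.1 ∨ v = ab.2 ∨ v = k) := by
  induction pairs generalizing s with
  | nil => simp
  | cons ab rest ih =>
    rw [List.foldl_cons]
    cases h : pvDictGet d (min ab.1 ab.2) (max ab.1 ab.2) with
    | none =>
      simp only [ih, List.mem_cons]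
      constructor
      · rintro (hv | ⟨p, hp, k, hk, hkP, hvv⟩)
        · exact Or.inl hv
        · exact Or.inr ⟨p, Or.inr hp, k, hk, hkP, hvv⟩
      · rintro (hv | ⟨p, hmem, k, hk, hkP, hvv⟩)
        · exact Or.inl hv
        · rcases hmem with heq | hp
          · subst heq; rw [h] at hk; cases hk
          · exact Or.inr ⟨p, hp, k, hk, hkP, hvv⟩
    | some k0 =>
      by_cases hc : k0 ∈ P
      · simp only [(PySem.Set.contains_iff P k0).2 hc, if_true, ih,
          PySem.Set.mem_add, List.mem_cons]
        constructor
        · rintro ((((hv | hv) | hv) | hv) | ⟨p, hp, k, hk, hkP, hvv⟩)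
          · exact Or.inl hv
          · exact Or.inr ⟨ab, Or.inl rfl, k0, h, hc, Or.inl hv⟩
          · exact Or.inr ⟨ab, Or.inl rfl, k0, h, hc, Or.inr (Or.inl hv)⟩
          · exact Or.inr ⟨ab, Or.inl rfl, k0, h, hc, Or.inr (Or.inr hv)⟩
          · exact Or.inr ⟨p, Or.inr hp, k, hk, hkP, hvv⟩
        · rintro (hv | ⟨p, hmem, k, hk, hkP, hvv⟩)
          · exact Or.inl (Or.inl (Or.inl (Or.inl hv)))
          · rcases hmem with heq | hp
            · subst heq; rw [h] at hk; cases hk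
              rcases hvv with hv | hv | hv
              · exact Or.inl (Or.inl (Or.inl (Or.inr hv)))
              · exact Or.inl (Or.inl (Or.inr hv))
              · exact Or.inl (Or.inr hv)
            · exact Or.inr ⟨p, hp, k, hk, hkP, hvv⟩
      · have hc' : PySem.Set.contains P k0 = false := by
          simpa [PySem.Set.contains_iff] using hc
        simp only [hc', ih, List.mem_cons, Bool.false_eq_true, if_false]
        constructor
        · rintro (hv | ⟨p, hp, k, hk, hkP, hvv⟩)
          · exact Or.inl hv
          · exact Or.inr ⟨p, Or.inr hp, k, hk, hkP, hvv⟩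
        · rintro (hv | ⟨p, hmem, k, hk, hkP, hvv⟩)
          · exact Or.inl hv
          · rcases hmem with heq | hp
            · subst heq; rw [h] at hk; cases hk; exact absurd hkP hc
            · exact Or.inr ⟨p, hp, k, hk, hkP, hvv⟩

-- membership in B's accumulating fold
theorem memB (d : List (Int × Int × Int)) (P : PySem.Set Int) (s : PySem.Set Int) (v : Int) :
    v ∈ d.foldl (fun acc t =>
      if PySem.Set.contains P t.1 && PySem.Set.contains P t.2.1
          && decide (t.1 < t.2.1) && PySem.Set.contains P t.2.2 then
        PySem.Set.add (PySem.Set.add (PySem.Set.add acc t.1) t.2.1) t.2.2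
      else acc) s
    ↔ v ∈ s ∨ ∃ t ∈ d, t.1 ∈ P ∧ t.2.1 ∈ P ∧ t.1 < t.2.1 ∧ t.2.2 ∈ P ∧
        (v = t.1 ∨ v = t.2.1 ∨ v = t.2.2) := by
  induction d generalizing s with
  | nil => simp
  | cons t rest ih =>
    rw [List.foldl_cons]
    by_cases hc : t.1 ∈ P ∧ t.2.1 ∈ P ∧ t.1 < t.2.1 ∧ t.2.2 ∈ P
    · have hb : (PySem.Set.contains P t.1 && PySem.Set.contains P t.2.1
          && decide (t.1 < t.2.1) && PySem.Set.contains P t.2.2) = true := by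
        simp only [Bool.and_eq_true, decide_eq_true_eq, PySem.Set.contains_iff]
        exact ⟨⟨⟨hc.1, hc.2.1⟩, hc.2.2.1⟩, hc.2.2.2⟩
      simp only [hb, if_true, ih, PySem.Set.mem_add, List.mem_cons]
      constructor
      · rintro ((((hv | hv) | hv) | hv) | ⟨p, hp, h1, h2, h3, h4, hvv⟩)
        · exact Or.inl hv
        · exact Or.inr ⟨t, Or.inl rfl, hc.1, hc.2.1, hc.2.2.1, hc.2.2.2, Or.inl hv⟩
        · exact Or.inr ⟨t, Or.inl rfl, hc.1, hc.2.1, hc.2.2.1, hc.2.2.2, Or.inr (Or.inl hv)⟩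
        · exact Or.inr ⟨t, Or.inl rfl, hc.1, hc.2.1, hc.2.2.1, hc.2.2.2, Or.inr (Or.inr hv)⟩
        · exact Or.inr ⟨p, Or.inr hp, h1, h2, h3, h4, hvv⟩
      · rintro (hv | ⟨p, hmem, h1, h2, h3, h4, hvv⟩)
        · exact Or.inl (Or.inl (Or.inl (Or.inl hv)))
        · rcases hmem with heq | hp
          · subst heq
            rcases hvv with hv | hv | hv
            · exact Or.inl (Or.inl (Or.inl (Or.inr hv)))
            · exact Or.inl (Or.inl (Or.inr hv))
            · exact Or.inl (Or.inr hv)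
          · exact Or.inr ⟨p, hp, h1, h2, h3, h4, hvv⟩
    · have hb : (PySem.Set.contains P t.1 && PySem.Set.contains P t.2.1
          && decide (t.1 < t.2.1) && PySem.Set.contains P t.2.2) = false := by
        by_contra hne
        rw [Bool.not_eq_false, Bool.and_eq_true, Bool.and_eq_true, Bool.and_eq_true] at hne
        exact hc ⟨(PySem.Set.contains_iff _ _).1 hne.1.1.1,
          (PySem.Set.contains_iff _ _).1 hne.1.1.2,
          of_decide_eq_true hne.1.2, (PySem.Set.contains_iff _ _).1 hne.2⟩
      simp only [hb, Bool.false_eq_true, if_false, ih, List.mem_cons]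
      constructor
      · rintro (hv | ⟨p, hp, hrest⟩)
        · exact Or.inl hv
        · exact Or.inr ⟨p, Or.inr hp, hrest⟩
      · rintro (hv | ⟨p, hmem, h1, h2, h3, h4, hvv⟩)
        · exact Or.inl hv
        · rcases hmem with heq | hp
          · subst heq; exact absurd ⟨h1, h2, h3, h4⟩ hc
          · exact Or.inr ⟨p, hp, h1, h2, h3, h4, hvv⟩

-- pairs produced by combinations(l, 2) have both components in l
theorem combos2_mem {α : Type} {l : List α} {a b : α}
    (h : (a, b) ∈ pvCombos2 l) : a ∈ l ∧ b ∈ l := by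
  induction l with
  | nil => simp [pvCombos2] at h
  | cons x xs ih =>
    simp only [pvCombos2, List.mem_append, List.mem_map] at h
    rcases h with ⟨y, hy, heq⟩ | h
    · cases heq; exact ⟨List.mem_cons_self, List.mem_cons_of_mem _ hy⟩
    · exact ⟨List.mem_cons_of_mem _ (ih h).1, List.mem_cons_of_mem _ (ih h).2⟩

-- on a duplicate-free list the two components of a combination differ
theorem combos2_ne {α : Type} {l : List α} {a b : α}
    (hnd : l.Nodup) (h : (a, b) ∈ pvCombos2 l) : a ≠ b := by
  induction l with
  | nil => simp [pvCombos2] at h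
  | cons x xs ih =>
    simp only [pvCombos2, List.mem_append, List.mem_map] at h
    rcases h with ⟨y, hy, heq⟩ | h
    · cases heq
      intro hab; subst hab
      exact (List.nodup_cons.1 hnd).1 hy
    · exact ih (List.nodup_cons.1 hnd).2 h

-- every pair of distinct members of l shows up as a combination, one way round
theorem combos2_exists {α : Type} {l : List α} {a b : α}
    (ha : a ∈ l) (hb : b ∈ l) (hne : a ≠ b) :
    (a, b) ∈ pvCombos2 l ∨ (b, a) ∈ pvCombos2 l := by
  induction l with
  | nil => simp at ha
  | cons x xs ih =>
    simp only [List.mem_cons] at ha hb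
    rcases ha with rfl | ha
    · rcases hb with rfl | hb
      · exact absurd rfl hne
      · exact Or.inl (by
          unfold pvCombos2
          exact List.mem_append_left _ (List.mem_map.2 ⟨b, hb, rfl⟩))
    · rcases hb with rfl | hb
      · exact Or.inr (by
          unfold pvCombos2
          exact List.mem_append_left _ (List.mem_map.2 ⟨a, ha, rfl⟩))
      · rcases ih ha hb with h | h
        · exact Or.inl (by unfold pvCombos2; exact List.mem_append_right _ h)
        · exact Or.inr (by unfold pvCombos2; exact List.mem_append_right _ h)

theorem pvDictGet_mem {d : List (Int × Int × Int)} {x y k : Int}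
    (h : pvDictGet d x y = some k) : (x, y, k) ∈ d := by
  unfold pvDictGet at h
  cases hf : d.find? (fun t => t.1 == x && t.2.1 == y) with
  | none => rw [hf] at h; cases h
  | some t =>
    rw [hf] at h
    cases h
    have hp := List.find?_some hf
    simp only [Bool.and_eq_true, beq_iff_eq] at hp
    have hm := List.mem_of_find?_eq_some hf
    have : (x, y, t.2.2) = t := by
      rcases hp with ⟨h1, h2⟩; rw [← h1, ← h2]
    rw [this]; exact hm

theorem pvDictGet_of_mem {d : List (Int × Int × Int)} {x y k : Int}
    (hnd : (d.map (fun t => (t.1, t.2.1))).Nodup) (hm : (x, y, k) ∈ d) :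
    pvDictGet d x y = some k := by
  induction d with
  | nil => simp at hm
  | cons t rest ih =>
    simp only [List.map_cons, List.nodup_cons] at hnd
    rcases List.mem_cons.1 hm with heq | hm'
    · unfold pvDictGet
      rw [List.find?_cons_of_pos (by rw [← heq]; simp)]
      rw [← heq]
      rfl
    · by_cases hk : t.1 = x ∧ t.2.1 = y
      · exfalso
        exact hnd.1 (List.mem_map.2 ⟨(x, y, k), hm', by
          rcases hk with ⟨h1, h2⟩; simp [h1, h2]⟩)
      · unfold pvDictGet
        rw [List.find?_cons_of_neg (by
          rcases not_and_or.1 hk with h | h <;> simp [h])]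
        exact ih hnd.2 hm'

-- a fold whose step preserves Nodup preserves Nodup
theorem nodup_foldl_step {β : Type} (step : PySem.Set Int → β → PySem.Set Int)
    (hstep : ∀ s b, s.Nodup → (step s b).Nodup) :
    ∀ (l : List β) (s : PySem.Set Int), s.Nodup → (l.foldl step s).Nodup := by
  intro l
  induction l with
  | nil => intro s hs; simpa using hs
  | cons b rest ih => intro s hs; rw [List.foldl_cons]; exact ih _ (hstep s b hs)

theorem pocket_activity_spec : Claim_equal_pocket_activity := by
  intro pocket d _hdom hpre
  unfold Spec_pocket_activity pocket_activity pocket_activity_alt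
  set P : PySem.Set Int := PySem.Set.ofList pocket with hP
  apply PySem.List.sorted_eq_sorted_of_perm _ _ _ (fun a b h => h)
  rw [List.perm_ext_iff_of_nodup]
  · intro v
    rw [memA d P _ _ v, memB d P _ v]
    simp only [PySem.Set.empty, List.not_mem_nil, false_or]
    constructor
    · rintro ⟨ab, hab, k, hk, hkP, hv⟩
      obtain ⟨ha, hb⟩ := combos2_mem hab
      have hne : ab.1 ≠ ab.2 := combos2_ne (by rw [hP]; exact PySem.Set.nodup_ofList pocket) hab
      have hmemd := pvDictGet_mem hk
      rcases le_total ab.1 ab.2 with hle | hle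
      · have hmin : min ab.1 ab.2 = ab.1 := min_eq_left hle
        have hmax : max ab.1 ab.2 = ab.2 := max_eq_right hle
        rw [hmin, hmax] at hmemd
        refine ⟨(ab.1, ab.2, k), hmemd, ha, hb, lt_of_le_of_ne hle hne, hkP, ?_⟩
        simpa using hv
      · have hmin : min ab.1 ab.2 = ab.2 := min_eq_right hle
        have hmax : max ab.1 ab.2 = ab.1 := max_eq_left hle
        rw [hmin, hmax] at hmemd
        refine ⟨(ab.2, ab.1, k), hmemd, hb, ha, lt_of_le_of_ne hle (Ne.symm hne), hkP, ?_⟩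
        simp only []
        tauto
    · rintro ⟨t, htd, h1, h2, h3, h4, hv⟩
      have hmm : (t.1, t.2.1, t.2.2) ∈ d := htd
      have hget : pvDictGet d t.1 t.2.1 = some t.2.2 := pvDictGet_of_mem hpre hmm
      rcases combos2_exists h1 h2 (ne_of_lt h3) with hc | hc
      · refine ⟨(t.1, t.2.1), hc, t.2.2, ?_, h4, by simpa using hv⟩
        simpa [min_eq_left (le_of_lt h3), max_eq_right (le_of_lt h3)] using hget
      · refine ⟨(t.2.1, t.1), hc, t.2.2, ?_, h4, by simp only []; tauto⟩
        simpa [min_eq_right (le_of_lt h3), max_eq_left (le_of_lt h3)] using hget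
  · exact nodup_foldl_step _ (fun s ab hs => by
      cases hg : pvDictGet d (min ab.1 ab.2) (max ab.1 ab.2) with
      | none => exact hs
      | some k =>
        by_cases hc : PySem.Set.contains P k = true
        · simp only [hc, if_true]
          exact PySem.Set.nodup_add _ _ (PySem.Set.nodup_add _ _ (PySem.Set.nodup_add _ _ hs))
        · simp only [Bool.not_eq_true] at hc
          simp only [hc, Bool.false_eq_true, if_false]; exact hs)
      _ _ List.nodup_nil
  · exact nodup_foldl_step _ (fun s t hs => by
      by_cases hc : (PySem.Set.contains P t.1 && PySem.Set.contains P t.2.1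
          && decide (t.1 < t.2.1) && PySem.Set.contains P t.2.2) = true
      · simp only [hc, if_true]
        exact PySem.Set.nodup_add _ _ (PySem.Set.nodup_add _ _ (PySem.Set.nodup_add _ _ hs))
      · simp only [Bool.not_eq_true] at hc
        simp only [hc, Bool.false_eq_true, if_false]; exact hs)
      _ _ List.nodup_nil
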